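-- pv_equiv track=rewrite | github.com/mishrakeshav/Competitive-Programming | binarysearch.io/largest_element_in_rotated_array.py | solve
-- ===== SOURCE A (Python) =====
-- def solve(arr):
--     # Write your code here
--     n = len(arr)
--
--     if len(arr) == 1:
--         return arr[0]
--
--     for i in range(n-1):
--         if arr[i+1] < arr[i]:
--             return arr[i]
--
--     return arr[-1]
-- ===== SOURCE B (Python) =====
-- def solve(arr):
--     # Back-to-front pass: walk the indices from the end toward the front,
--     # overwriting the candidate at every descent; the value written last
--     # (the leftmost descent) wins, defaulting to the last element.
--     best = arr[-1]
--     for i in range(len(arr) - 2, -1, -1):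
--         if arr[i + 1] < arr[i]:
--             best = arr[i]
--     return best
-- ===== Notes on version B (the rewrite author's own statement) =====
-- stated objective: alternative
-- what changed: Replaces A's forward scan with early return (plus a separate len==1 case) by a single backward traversal from the end that overwrites an accumulator at every descent, so the leftmost descent wins by being written last and the last element is the natural default.
import Mathlib
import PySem

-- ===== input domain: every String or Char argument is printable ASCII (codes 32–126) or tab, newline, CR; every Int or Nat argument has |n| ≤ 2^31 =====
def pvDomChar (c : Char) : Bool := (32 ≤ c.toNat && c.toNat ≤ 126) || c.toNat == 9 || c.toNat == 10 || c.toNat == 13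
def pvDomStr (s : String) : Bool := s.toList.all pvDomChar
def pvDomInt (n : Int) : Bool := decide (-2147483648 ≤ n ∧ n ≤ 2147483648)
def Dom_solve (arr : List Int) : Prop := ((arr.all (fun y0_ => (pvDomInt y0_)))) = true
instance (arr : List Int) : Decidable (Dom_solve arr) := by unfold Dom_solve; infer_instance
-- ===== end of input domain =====

-- B: a backward traversal from the end that overwrites an accumulator at every descent
-- (leftmost descent wins by being written last, last element as default), instead of
-- A's forward early-return scan with a separate len==1 case (alternative).
-- A raises IndexError on [], so Pre_solve requires a nonempty list.


-- ===== PORT A =====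
-- the 'for i in range(n-1)' loop with its early return; range(n-1) is ported as the
-- Nat list List.range (n-1) (exact), and arr[i]/arr[i+1] as arr.getD (exact: every i
-- the loop visits satisfies i+1 < arr.length)
def solveLoop (arr : List Int) : List Nat → Option Int
  | [] => none
  | i :: rest =>
      if arr.getD (i + 1) 0 < arr.getD i 0 then some (arr.getD i 0)
      else solveLoop arr rest

def solve (arr : List Int) : Int :=
  let n := arr.length
  if arr.length = 1 then (PySem.List.pyGet? arr 0).getD 0
  else
    match solveLoop arr (List.range (n - 1)) with
    | some v => v
    | none => (PySem.List.pyGet? arr (-1)).getD 0   -- arr[-1]; in range under Pre_solve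

-- ===== PORT B =====
-- best = arr[-1]; for i in range(len(arr)-2, -1, -1): overwrite best at a descent.
-- range(len-2, -1, -1) is PySem.List.pyRange (exact); arr[i]/arr[i+1]/arr[-1] as
-- PySem.List.pyGetD (exact: every visited i has 0 ≤ i ∧ i+1 < len, and arr ≠ [] under Pre_)
def solve_alt (arr : List Int) : Int :=
  (PySem.List.pyRange ((arr.length : Int) - 2) (-1) (-1)).foldl
    (fun best i =>
      if PySem.List.pyGetD arr (i + 1) 0 < PySem.List.pyGetD arr i 0 then
        PySem.List.pyGetD arr i 0
      else best)
    (PySem.List.pyGetD arr (-1) 0)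

-- ===== PRECONDITION & SPEC =====
-- A indexes the last (or first) element and raises IndexError on the empty list
def Pre_solve (arr : List Int) : Prop := arr ≠ []
instance (arr : List Int) : Decidable (Pre_solve arr) := by unfold Pre_solve; infer_instance
def pvWitness_solve : List Int := [3, 1, 2]

def Spec_solve (arr : List Int) (out : Int) : Prop := out = solve_alt arr
instance (arr : List Int) (out : Int) : Decidable (Spec_solve arr out) := by unfold Spec_solve; infer_instance

-- ===== CLAIM =====
def Claim_equal_solve : Prop := ∀ (arr : List Int), Dom_solve arr → Pre_solve arr → Spec_solve arr (solve arr)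

-- ===== LEMMAS AND PROOFS =====

-- A's early-return loop is the first index passing the test, mapped through arr.getD
lemma solveLoop_eq_find (arr : List Int) (l : List Nat) :
    solveLoop arr l =
      (l.find? (fun i => decide (arr.getD (i + 1) 0 < arr.getD i 0))).map
        (fun i => arr.getD i 0) := by
  induction l with
  | nil => rfl
  | cons i rest ih =>
      rw [solveLoop]
      by_cases h : arr.getD (i + 1) 0 < arr.getD i 0
      · rw [if_pos h, List.find?_cons_of_pos (by simpa using h)]; rfl
      · rw [if_neg h, List.find?_cons_of_neg (by simpa using h), ih]

-- overwrite-fold over a reversed list: the FIRST (forward) passing element wins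
lemma foldl_reverse_overwrite {α β : Type} (P : α → Prop) [DecidablePred P] (g : α → β)
    (d : β) (l : List α) :
    l.reverse.foldl (fun acc i => if P i then g i else acc) d =
      ((l.find? (fun i => decide (P i))).map g).getD d := by
  induction l with
  | nil => rfl
  | cons x xs ih =>
      rw [List.reverse_cons, List.foldl_append]
      by_cases h : P x
      · rw [List.find?_cons_of_pos (by simpa using h)]
        simp [h]
      · rw [List.find?_cons_of_neg (by simpa using h), ← ih]
        simp [h]

-- ===== VERDICT =====
theorem solve_spec : Claim_equal_solve := by
  intro arr _hdom hpre
  unfold Spec_solve solve solve_alt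
  have hlen : 0 < arr.length := List.length_pos_of_ne_nil hpre
  by_cases h1 : arr.length = 1
  · match arr, h1 with
    | [x], _ =>
        norm_num [PySem.List.pyRange_neg_one_eq_nil, PySem.List.pyGetD,
          PySem.List.pyGet?, PySem.List.pyIdx?]
  · have hrange : PySem.List.pyRange ((arr.length : Int) - 2) (-1) (-1)
        = (PySem.List.pyRange 0 ((arr.length : Int) - 1) 1).reverse := by
      rw [PySem.List.pyRange_neg_one_eq_reverse,
        show ((-1 : Int) + 1) = 0 by ring,
        show ((arr.length : Int) - 2 + 1) = (arr.length : Int) - 1 by ring]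
    have hcast : ((arr.length : Int) - 1) = ((arr.length - 1 : Nat) : Int) := by
      push_cast [hlen]; omega
    have hnat : PySem.List.pyRange 0 ((arr.length : Int) - 1) 1
        = (List.range (arr.length - 1)).map (fun k : Nat => (k : Int)) := by
      rw [hcast, PySem.List.pyRange_zero_nat]
    simp only [h1, if_false]
    rw [hrange, hnat, ← List.map_reverse, List.foldl_map,
      foldl_reverse_overwrite
        (fun i : Nat => PySem.List.pyGetD arr ((i : Int) + 1) 0 < PySem.List.pyGetD arr (i : Int) 0)
        (fun i : Nat => PySem.List.pyGetD arr (i : Int) 0),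
      solveLoop_eq_find]
    have hP : (fun i : Nat =>
        decide (PySem.List.pyGetD arr ((i : Int) + 1) 0 < PySem.List.pyGetD arr (i : Int) 0))
        = (fun i : Nat => decide (arr.getD (i + 1) 0 < arr.getD i 0)) := by
      funext i
      have h2 : ((i : Int) + 1) = ((i + 1 : Nat) : Int) := by push_cast; ring
      rw [h2, PySem.List.pyGetD_natCast, PySem.List.pyGetD_natCast]
    rw [hP]
    cases hf : (List.range (arr.length - 1)).find?
        (fun i => decide (arr.getD (i + 1) 0 < arr.getD i 0)) with
    | none => simp [PySem.List.pyGetD]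
    | some i => simp [PySem.List.pyGetD_natCast]
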